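-- pv_equiv track=rewrite | github.com/maxscherbakov/spbu-python-course | project/generators/rgba_generator.py | get_nth_rgba_vec
-- ===== SOURCE A (Python) =====
-- from typing import Generator
-- from itertools import product
--
-- def get_rgba_gen() -> Generator[tuple[int, int, int, int], None, None]:
--     """
--     A function that returns a generator of 4-dimensional rgba vectors.
--
--     Returns:
--         result (Generator[tuple[int, int, int, int], None, None]): generator of 4-dimensional rgba vectors.
--     """
--     return (
--         (r, g, b, a * 2)
--         for r, g, b in product(range(256), repeat=3)
--         for a in range(0, 50)
--     )
--
-- def get_nth_rgba_vec(n: int) -> tuple[int, int, int, int]: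
--     """
--     A function that returns the nth element of a set of 4-dimensional rgba vectors.
--
--     Args:
--         n (int): the element number of the vector set.
--
--     Returns:
--         result (tuple[int, int, int, int]): the vector is at the nth position in the set.
--     """
--     if n < 0:
--         raise IndexError("`n` must be non-negative")
--
--     gen = get_rgba_gen()
--
--     for i, val in enumerate(gen):
--         if i == n:
--             return val
--
--     raise IndexError(f"Generator does not have {n} elements.")
-- ===== SOURCE B (Python) =====
-- def get_nth_rgba_vec(n: int) -> tuple[int, int, int, int]:
--     if n < 0:
--         raise IndexError("`n` must be non-negative")
--     if n >= 256 * 256 * 256 * 50: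
--         raise IndexError(f"Generator does not have {n} elements.")
--     n, a = divmod(n, 50)
--     n, b = divmod(n, 256)
--     r, g = divmod(n, 256)
--     return (r, g, b, a * 2)
-- ===== Notes on version B (the rewrite author's own statement) =====
-- stated objective: faster
-- what changed: Replaces the O(n) scan through the itertools.product generator with an O(1) mixed-radix divmod decomposition of n over bases 50,256,256.
import Mathlib
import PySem

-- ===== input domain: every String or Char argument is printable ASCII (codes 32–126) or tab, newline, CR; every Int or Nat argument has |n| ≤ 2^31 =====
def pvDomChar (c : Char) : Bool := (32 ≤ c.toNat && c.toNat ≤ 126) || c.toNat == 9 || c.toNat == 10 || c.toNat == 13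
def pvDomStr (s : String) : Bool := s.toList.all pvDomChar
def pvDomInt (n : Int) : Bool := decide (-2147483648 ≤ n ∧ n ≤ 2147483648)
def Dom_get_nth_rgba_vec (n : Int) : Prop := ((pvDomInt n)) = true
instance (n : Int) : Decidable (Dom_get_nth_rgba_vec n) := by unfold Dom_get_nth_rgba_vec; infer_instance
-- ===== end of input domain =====

-- B replaces A's O(n) scan through the generator by an O(1) divmod decomposition
-- of n over bases 50,256,256; equivalence proved on 0 ≤ n < 256^3*50 (elsewhere A raises).

-- ===== PORT A =====
-- A consumes the lazy generator element by element; the port models the generator's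
-- cursor (r,g,b,a) and its 'next' advance, applied n times (tail-recursively).
def pvStepA (s : Int × Int × Int × Int) : Int × Int × Int × Int :=
  match s with
  | (r, g, b, a) =>
    if a + 1 < 50 then (r, g, b, a + 1)
    else if b + 1 < 256 then (r, g, b + 1, 0)
    else if g + 1 < 256 then (r, g + 1, 0, 0)
    else (r + 1, 0, 0, 0)

def pvLoopA : Nat → (Int × Int × Int × Int) → (Int × Int × Int × Int)
  | 0, s => s
  | k + 1, s => pvLoopA k (pvStepA s)

def get_nth_rgba_vec (n : Int) : List Int :=
  if n < 0 then []                      -- A raises IndexError here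
  else if n < 838860800 then
    match pvLoopA n.toNat (0, 0, 0, 0) with
    | (r, g, b, a) => [r, g, b, a * 2]  -- the generator yields (r, g, b, a*2)
  else []                               -- generator exhausted: A raises IndexError

-- ===== PORT B =====
def get_nth_rgba_vec_alt (n : Int) : List Int :=
  if n < 0 then []                      -- B raises IndexError here
  else if 838860800 ≤ n then []         -- B raises IndexError here
  else
    let a := PySem.Int.mod n 50
    let n1 := PySem.Int.floordiv n 50
    let b := PySem.Int.mod n1 256
    let n2 := PySem.Int.floordiv n1 256
    let g := PySem.Int.mod n2 256
    let r := PySem.Int.floordiv n2 256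
    [r, g, b, a * 2]

-- ===== PRECONDITION & SPEC =====
-- exactly the inputs on which the Python A returns (outside, A raises IndexError)
def Pre_get_nth_rgba_vec (n : Int) : Prop := 0 ≤ n ∧ n < 838860800
instance (n : Int) : Decidable (Pre_get_nth_rgba_vec n) := by unfold Pre_get_nth_rgba_vec; infer_instance
def pvWitness_get_nth_rgba_vec : Int := (3276801)

def Spec_get_nth_rgba_vec (n : Int) (out : List Int) : Prop := out = get_nth_rgba_vec_alt n
instance (n : Int) (out : List Int) : Decidable (Spec_get_nth_rgba_vec n out) := by unfold Spec_get_nth_rgba_vec; infer_instance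

-- ===== CLAIM (what is proved, stated in full; the proofs are below) =====
def Claim_equal_get_nth_rgba_vec : Prop := ∀ (n : Int), Dom_get_nth_rgba_vec n → Pre_get_nth_rgba_vec n → Spec_get_nth_rgba_vec n (get_nth_rgba_vec n)

-- ===== LEMMAS AND PROOFS =====

theorem pvLoopA_succ (k : Nat) (s : Int × Int × Int × Int) :
    pvLoopA (k + 1) s = pvStepA (pvLoopA k s) := by
  induction k generalizing s with
  | zero => rfl
  | succ m ih => simp only [pvLoopA]; exact ih (pvStepA s)

-- the generator's cursor after k steps is the mixed-radix decomposition of k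
theorem pvLoopA_eq (k : Nat) (hk : k < 838860800) :
    pvLoopA k (0, 0, 0, 0) =
      (((k / 3276800 : Nat) : Int), ((k / 12800 % 256 : Nat) : Int),
       ((k / 50 % 256 : Nat) : Int), ((k % 50 : Nat) : Int)) := by
  induction k with
  | zero => rfl
  | succ m ih =>
    rw [pvLoopA_succ, ih (by omega)]
    simp only [pvStepA]
    split_ifs with h1 h2 h3 <;>
      simp only [Prod.mk.injEq] <;>
      refine ⟨by omega, by omega, by omega, by omega⟩

-- ===== VERDICT (by name: the statement is the Claim_ definition above) =====
theorem get_nth_rgba_vec_spec : Claim_equal_get_nth_rgba_vec := by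
  intro n _ hpre
  obtain ⟨h0, hlt⟩ := hpre
  unfold Spec_get_nth_rgba_vec get_nth_rgba_vec get_nth_rgba_vec_alt
  rw [if_neg (by omega), if_pos (by omega), if_neg (by omega), if_neg (by omega)]
  have hk : n.toNat < 838860800 := by omega
  rw [pvLoopA_eq n.toNat hk]
  have hn : (n.toNat : Int) = n := Int.toNat_of_nonneg h0
  have h50 : PySem.Int.mod n 50 = n % 50 := PySem.Int.mod_eq_emod_of_pos (by omega)
  have hd50 : PySem.Int.floordiv n 50 = n / 50 := PySem.Int.floordiv_eq_ediv_of_pos (by omega)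
  have h256 : PySem.Int.mod (n / 50) 256 = n / 50 % 256 := by
    rw [hd50] at *; exact PySem.Int.mod_eq_emod_of_pos (by omega)
  have hd256 : PySem.Int.floordiv (n / 50) 256 = n / 50 / 256 := PySem.Int.floordiv_eq_ediv_of_pos (by omega)
  have h256' : PySem.Int.mod (n / 50 / 256) 256 = n / 50 / 256 % 256 := PySem.Int.mod_eq_emod_of_pos (by omega)
  have hd256' : PySem.Int.floordiv (n / 50 / 256) 256 = n / 50 / 256 / 256 := PySem.Int.floordiv_eq_ediv_of_pos (by omega)
  simp only [hd50, h50, hd256, h256, hd256', h256', List.cons.injEq, and_true]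
  refine ⟨by omega, by omega, by omega, by omega⟩
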